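-- pv_equiv track=rewrite | github.com/raju32742/Hemoglobin_PPG_Smartphone | max_first_three.py | max_first_three
-- ===== SOURCE A (Python) =====
-- def max_first_three(lst):
--     ranks = sorted( [(x,i) for (i,x) in enumerate(lst)], reverse=True )
--     values = []
--     posns = []
--     for x,i in ranks:
--         if x not in values:
--             values.append( x )
--             posns.append( i )
--             if len(values) == 3:
--                 break
--
--     return values, posns
-- ===== SOURCE B (Python) =====
-- def max_first_three(lst):
--     last = {}
--     for i, x in enumerate(lst):
--         last[x] = i
--     top = sorted(last.items(), key=lambda t: t[0], reverse=True)[:3]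
--     return [x for x, _ in top], [i for _, i in top]
-- ===== Notes on version B (the rewrite author's own statement) =====
-- stated objective: alternative
-- what changed: B builds a value-to-last-index dict in one pass and sorts only the distinct values, instead of sorting all (value,index) pairs and scanning the sorted output with a linear 'not in values' membership test.
import Mathlib
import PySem

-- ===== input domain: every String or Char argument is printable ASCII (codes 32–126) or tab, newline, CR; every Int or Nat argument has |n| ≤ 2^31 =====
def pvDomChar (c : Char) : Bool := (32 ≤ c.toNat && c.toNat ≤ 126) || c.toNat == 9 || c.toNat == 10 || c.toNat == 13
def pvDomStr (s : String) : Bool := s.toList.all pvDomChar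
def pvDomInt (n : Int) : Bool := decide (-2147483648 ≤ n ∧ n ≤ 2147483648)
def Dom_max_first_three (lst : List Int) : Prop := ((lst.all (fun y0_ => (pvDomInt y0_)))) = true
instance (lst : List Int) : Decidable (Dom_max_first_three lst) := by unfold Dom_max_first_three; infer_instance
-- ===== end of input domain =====

-- B replaces A's full sort of all (value,index) pairs plus a linear 'not in values' scan by one
-- dict pass keeping the last index of each value and a sort of the distinct values only (alternative).

-- ===== PORT A =====
-- the 'for x,i in ranks: if x not in values: …; if len(values)==3: break' loop
def maxLoopA : List (Int × Int) → List Int → List Int → List Int × List Int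
  | [], values, posns => (values, posns)
  | (x, i) :: rest, values, posns =>
    if x ∈ values then maxLoopA rest values posns
    else if (values ++ [x]).length = 3 then (values ++ [x], posns ++ [i])
    else maxLoopA rest (values ++ [x]) (posns ++ [i])

def max_first_three (lst : List Int) : List Int × List Int :=
  let ranks := PySem.List.sorted2
    ((PySem.List.enumerate lst).map (fun p => (p.2, p.1))) (fun t => t.1) (fun t => t.2) true
  maxLoopA ranks [] []

-- ===== PORT B =====
def max_first_three_alt (lst : List Int) : List Int × List Int :=
  let last := (PySem.List.enumerate lst).foldl (fun d p => d.insert p.2 p.1)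
    (PySem.Dict.empty : PySem.Dict Int Int)
  let top := PySem.List.slice (PySem.List.sorted last.items (fun t => t.1) true) none (some 3)
  (top.map (fun t => t.1), top.map (fun t => t.2))

-- ===== PRECONDITION & SPEC =====
def Spec_max_first_three (lst : List Int) (out : List Int × List Int) : Prop := out = max_first_three_alt lst
instance (lst : List Int) (out : List Int × List Int) : Decidable (Spec_max_first_three lst out) := by unfold Spec_max_first_three; infer_instance

-- ===== CLAIM (what is proved, stated in full; the proofs are below) =====
def Claim_equal_max_first_three : Prop := ∀ (lst : List Int), Dom_max_first_three lst → Spec_max_first_three lst (max_first_three lst)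

-- ===== LEMMAS AND PROOFS =====

-- first pair per distinct first component (relative to already-seen values)
def dedupF (seen : List Int) : List (Int × Int) → List (Int × Int)
  | [] => []
  | p :: rest => if p.1 ∈ seen then dedupF seen rest else p :: dedupF (seen ++ [p.1]) rest

-- the pair (i, x): i is the position of the LAST occurrence of x in lst
def GoodAt (lst : List Int) (x i : Int) : Prop :=
  (i, x) ∈ PySem.List.enumerate lst ∧ ∀ j, (j, x) ∈ PySem.List.enumerate lst → j ≤ i

-- find? in a Pairwise list: every later match is dominated
theorem find?_max {α : Type} (R : α → α → Prop) :
    ∀ (l : List α), l.Pairwise R → ∀ (pred : α → Bool) (a : α), l.find? pred = some a →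
      ∀ b ∈ l, pred b = true → b = a ∨ R a b := by
  intro l
  induction l with
  | nil => intro _ pred a ha; simp at ha
  | cons c t ih =>
    intro hp pred a ha b hb hpb
    rcases List.pairwise_cons.mp hp with ⟨hc, ht⟩
    by_cases hpc : pred c = true
    · rw [List.find?_cons_of_pos hpc] at ha
      cases ha
      rcases List.mem_cons.mp hb with rfl | hbt
      · exact Or.inl rfl
      · exact Or.inr (hc b hbt)
    · rw [List.find?_cons_of_neg (by simpa using hpc)] at ha
      rcases List.mem_cons.mp hb with rfl | hbt
      · exact absurd hpb hpc
      · exact ih ht pred a ha b hbt hpb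

theorem mem_dedupF : ∀ (l : List (Int × Int)) (seen : List Int) (p : Int × Int),
    p ∈ dedupF seen l ↔ (p.1 ∉ seen ∧ l.find? (fun q => q.1 == p.1) = some p) := by
  intro l
  induction l with
  | nil => intro seen p; simp [dedupF]
  | cons q rest ih =>
    intro seen p
    simp only [dedupF]
    by_cases hq : q.1 ∈ seen
    · rw [if_pos hq, ih]
      by_cases hqp : q.1 = p.1
      · exact iff_of_false (fun h => h.1 (hqp ▸ hq)) (fun h => h.1 (hqp ▸ hq))
      · rw [List.find?_cons_of_neg (by simpa using hqp)]
    · rw [if_neg hq]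
      by_cases hqp : q.1 = p.1
      · rw [List.find?_cons_of_pos (by simpa using hqp)]
        constructor
        · intro hmem
          rcases List.mem_cons.mp hmem with rfl | hmem'
          · exact ⟨hqp ▸ hq, rfl⟩
          · rcases (ih _ _).mp hmem' with ⟨hns, _⟩
            exact absurd (by simp [← hqp]) hns
        · rintro ⟨hns, heq⟩
          exact List.mem_cons.mpr (Or.inl (Option.some.inj heq).symm)
      · rw [List.find?_cons_of_neg (by simpa using hqp)]
        constructor
        · intro hmem
          rcases List.mem_cons.mp hmem with rfl | hmem'
          · exact absurd rfl hqp
          · rcases (ih _ _).mp hmem' with ⟨hns, hf⟩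
            exact ⟨fun hm => hns (List.mem_append_left _ hm), hf⟩
        · rintro ⟨hns, hf⟩
          refine List.mem_cons.mpr (Or.inr ((ih _ _).mpr ⟨?_, hf⟩))
          simp only [List.mem_append, List.mem_singleton]
          rintro (h | h)
          · exact hns h
          · exact hqp h.symm


theorem dedupF_sublist : ∀ (l : List (Int × Int)) (seen : List Int),
    (dedupF seen l).Sublist l := by
  intro l
  induction l with
  | nil => intro seen; simp [dedupF]
  | cons q rest ih =>
    intro seen
    simp only [dedupF]
    by_cases hq : q.1 ∈ seen
    · rw [if_pos hq]; exact (ih seen).cons q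
    · rw [if_neg hq]; exact (ih _).cons₂ q


theorem dedupF_fst_nodup : ∀ (l : List (Int × Int)) (seen : List Int),
    ((dedupF seen l).map (fun p => p.1)).Nodup := by
  intro l
  induction l with
  | nil => intro seen; simp [dedupF]
  | cons q rest ih =>
    intro seen
    simp only [dedupF]
    by_cases hq : q.1 ∈ seen
    · rw [if_pos hq]; exact ih seen
    · rw [if_neg hq]
      simp only [List.map_cons, List.nodup_cons]
      refine ⟨?_, ih _⟩
      intro hmem
      rcases List.mem_map.mp hmem with ⟨p, hp, hp1⟩
      rcases (mem_dedupF _ _ _).mp hp with ⟨hns, _⟩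
      exact hns (by simp [hp1])


-- insertion with an asymmetric transitive 'before' keeps the list Pairwise-sorted
theorem pairwise_insertBy {α : Type} (before : α → α → Bool)
    (hasym : ∀ a b, before a b = true → before b a = false)
    (htrans : ∀ a b c, before a b = true → before b c = true → before a c = true)
    (x : α) : ∀ (ys : List α), ys.Pairwise (fun a b => before b a = false) →
    (PySem.List.insertBy before x ys).Pairwise (fun a b => before b a = false) := by
  intro ys
  induction ys with
  | nil => intro _; simp [PySem.List.insertBy]
  | cons y ys ih =>
    intro h
    rcases List.pairwise_cons.mp h with ⟨hy, hys⟩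
    simp only [PySem.List.insertBy]
    by_cases hxy : before x y = true
    · rw [if_pos hxy]
      refine List.pairwise_cons.mpr ⟨?_, h⟩
      intro z hz
      rcases List.mem_cons.mp hz with rfl | hzys
      · exact hasym _ _ hxy
      · by_contra hzx
        have hzx' : before z x = true := by
          cases hb : before z x with
          | true => rfl
          | false => exact absurd hb hzx
        have h1 := htrans z x y hzx' hxy
        have h2 := hy z hzys
        rw [h2] at h1; exact Bool.false_ne_true h1
    · rw [if_neg hxy]
      refine List.pairwise_cons.mpr ⟨?_, ih hys⟩
      intro z hz
      rcases (PySem.List.mem_insertBy before x z ys).mp hz with rfl | hzys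
      · exact Bool.eq_false_iff.mpr hxy
      · exact hy z hzys


theorem pairwise_foldl_insertBy {α : Type} (before : α → α → Bool)
    (hasym : ∀ a b, before a b = true → before b a = false)
    (htrans : ∀ a b c, before a b = true → before b c = true → before a c = true) :
    ∀ (xs acc : List α), acc.Pairwise (fun a b => before b a = false) →
    (xs.foldl (fun acc x => PySem.List.insertBy before x acc) acc).Pairwise
      (fun a b => before b a = false) := by
  intro xs
  induction xs with
  | nil => intro acc h; simpa using h
  | cons x xs ih =>
    intro acc h
    simp only [List.foldl_cons]
    exact ih _ (pairwise_insertBy before hasym htrans x acc h)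


-- the descending-lex sort of pairs is Pairwise lex-≥
theorem sorted2_rev_pairwise (xs : List (Int × Int)) :
    (PySem.List.sorted2 xs (fun t => t.1) (fun t => t.2) true).Pairwise
      (fun a b => b.1 < a.1 ∨ (b.1 = a.1 ∧ b.2 ≤ a.2)) := by
  have e : PySem.List.sorted2 xs (fun t : Int × Int => t.1) (fun t => t.2) true =
      List.foldl (fun acc x => PySem.List.insertBy
        (fun a b : Int × Int => decide (b.1 < a.1) || (!decide (a.1 < b.1) && decide (b.2 < a.2)))
        x acc) [] xs := rfl
  rw [e]
  have h := pairwise_foldl_insertBy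
    (before := fun a b : Int × Int => decide (b.1 < a.1) || (!decide (a.1 < b.1) && decide (b.2 < a.2)))
    (by intro a b hab; simp at hab ⊢; omega)
    (by intro a b c hab hbc; simp at hab hbc ⊢; omega)
    xs [] (by simp)
  refine h.imp ?_
  intro a b hab
  simp at hab
  omega


-- membership in dedupF [] (sorted pairs) = last-occurrence pairs
theorem mem_L_iff (lst : List Int) (p : Int × Int) :
    p ∈ dedupF [] (PySem.List.sorted2
      ((PySem.List.enumerate lst).map (fun q => (q.2, q.1))) (fun t => t.1) (fun t => t.2) true)
    ↔ GoodAt lst p.1 p.2 := by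
  have hperm := PySem.List.sorted2_perm
    ((PySem.List.enumerate lst).map (fun q => (q.2, q.1))) (fun t : Int × Int => t.1)
    (fun t : Int × Int => t.2) true
  have hpw := sorted2_rev_pairwise ((PySem.List.enumerate lst).map (fun q => (q.2, q.1)))
  have hmemP : ∀ q : Int × Int,
      q ∈ (PySem.List.enumerate lst).map (fun r => (r.2, r.1)) ↔ (q.2, q.1) ∈ PySem.List.enumerate lst := by
    intro q
    constructor
    · intro hq
      rcases List.mem_map.mp hq with ⟨r, hr, hrq⟩
      subst hrq; simpa using hr
    · intro hq
      exact List.mem_map.mpr ⟨(q.2, q.1), hq, rfl⟩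
  rw [mem_dedupF]
  constructor
  · rintro ⟨-, hf⟩
    have hpS := List.mem_of_find?_eq_some hf
    have hpP := hperm.subset hpS
    have h1 := (hmemP p).mp hpP
    refine ⟨h1, ?_⟩
    intro j hj
    have hjS : (p.1, j) ∈ PySem.List.sorted2
        ((PySem.List.enumerate lst).map (fun q => (q.2, q.1))) (fun t : Int × Int => t.1)
        (fun t : Int × Int => t.2) true :=
      hperm.mem_iff.mpr ((hmemP (p.1, j)).mpr hj)
    rcases find?_max _ _ hpw _ _ hf (p.1, j) hjS (by simp) with heq | hrel
    · have : j = p.2 := congrArg Prod.snd heq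
      omega
    · rcases hrel with h | ⟨-, h⟩
      · exact absurd h (by simp)
      · simpa using h
  · rintro ⟨h1, hmax⟩
    refine ⟨by simp, ?_⟩
    have hmemS : p ∈ PySem.List.sorted2
        ((PySem.List.enumerate lst).map (fun q => (q.2, q.1))) (fun t : Int × Int => t.1)
        (fun t : Int × Int => t.2) true :=
      hperm.mem_iff.mpr ((hmemP p).mpr (by simpa using h1))
    have hs : ((PySem.List.sorted2 ((PySem.List.enumerate lst).map (fun q => (q.2, q.1)))
        (fun t : Int × Int => t.1) (fun t : Int × Int => t.2) true).find?
        (fun q => q.1 == p.1)).isSome := List.find?_isSome.mpr ⟨p, hmemS, by simp⟩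
    obtain ⟨a, ha⟩ := Option.isSome_iff_exists.mp hs
    have hpa : a.1 = p.1 := by have := List.find?_some ha; simpa using this
    have haS := List.mem_of_find?_eq_some ha
    have haP := (hmemP a).mp (hperm.subset haS)
    have hle : a.2 ≤ p.2 := hmax a.2 (hpa ▸ haP)
    have hge : p.2 ≤ a.2 := by
      rcases find?_max _ _ hpw _ _ ha p hmemS (by simp) with heq | hrel
      · exact le_of_eq (congrArg Prod.snd heq)
      · rcases hrel with h | ⟨_, h⟩
        · rw [hpa] at h; omega
        · exact h
    have hap : a = p := Prod.ext hpa (le_antisymm hle hge)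
    rw [hap] at ha; exact ha


-- get? of the 'last[x] = i' loop: last matching pair wins
theorem get?_insert_fold : ∀ (l : List (Int × Int)) (d : PySem.Dict Int Int) (x : Int),
    ((l.foldl (fun d p => d.insert p.2 p.1) d).get? x) =
      (match l.reverse.find? (fun p => p.2 == x) with
       | some p => some p.1
       | none => d.get? x) := by
  intro l
  induction l with
  | nil => intro d x; simp
  | cons a t ih =>
    intro d x
    simp only [List.foldl_cons, List.reverse_cons]
    rw [ih, List.find?_append]
    cases hf : t.reverse.find? (fun p => p.2 == x) with
    | some p => simp [Option.or]
    | none =>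
      simp only [Option.none_or]
      rw [PySem.Dict.get?_insert]
      by_cases hax : a.2 = x
      · rw [List.find?_cons_of_pos (by simpa using hax)]
        simp [hax]
      · rw [List.find?_cons_of_neg (by simpa using hax)]
        rw [if_neg (fun h => hax h.symm)]
        simp


theorem mem_items_iff (lst : List Int) (p : Int × Int) :
    p ∈ ((PySem.List.enumerate lst).foldl (fun d q => d.insert q.2 q.1)
      (PySem.Dict.empty : PySem.Dict Int Int)).items
    ↔ GoodAt lst p.1 p.2 := by
  have hknd : ((PySem.List.enumerate lst).foldl (fun d q => d.insert q.2 q.1)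
      (PySem.Dict.empty : PySem.Dict Int Int)).keys.Nodup := by
    exact PySem.Dict.nodup_keys_foldl_insert_key _ (fun q : Int × Int => q.2)
      (fun _ q => q.1) _ (by simp [PySem.Dict.keys_empty])
  rw [← Prod.mk.eta (p := p),
    ← PySem.Dict.get?_eq_some_iff_mem_items _ _ _ hknd]
  rw [get?_insert_fold]
  have hpwr : (PySem.List.enumerate lst).reverse.Pairwise
      (fun u v : Int × Int => v.1 ≤ u.1) := by
    rw [List.pairwise_reverse]
    exact (PySem.List.pairwise_lt_enumerate lst 0).imp (fun h => le_of_lt h)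
  constructor
  · intro h
    cases hf : (PySem.List.enumerate lst).reverse.find? (fun q => q.2 == p.1) with
    | none => rw [hf] at h; simp at h
    | some a =>
      rw [hf] at h
      simp only at h
      have ha2 : a.2 = p.1 := by have := List.find?_some hf; simpa using this
      have ha1 : a.1 = p.2 := by injection h
      have haE : a ∈ PySem.List.enumerate lst := by
        have := List.mem_of_find?_eq_some hf; simpa using this
      constructor
      · rw [← ha1, ← ha2, Prod.mk.eta]; exact haE
      · intro j hj
        have hjrev : (j, p.1) ∈ (PySem.List.enumerate lst).reverse := by
          simpa using hj
        rcases find?_max _ _ hpwr _ _ hf (j, p.1) hjrev (by simp) with heq | hrel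
        · have : j = a.1 := congrArg Prod.fst heq
          omega
        · simp only at hrel; omega
  · rintro ⟨h1, hmax⟩
    have hs : (((PySem.List.enumerate lst).reverse).find? (fun q => q.2 == p.1)).isSome :=
      List.find?_isSome.mpr ⟨(p.2, p.1), by simpa using h1, by simp⟩
    obtain ⟨a, ha⟩ := Option.isSome_iff_exists.mp hs
    have ha2 : a.2 = p.1 := by have := List.find?_some ha; simpa using this
    have haE : a ∈ PySem.List.enumerate lst := by
      have := List.mem_of_find?_eq_some ha; simpa using this
    have hle : a.1 ≤ p.2 := hmax a.1 (by rw [← ha2]; simpa using haE)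
    have hge : p.2 ≤ a.1 := by
      rcases find?_max _ _ hpwr _ _ ha (p.2, p.1) (by simpa using h1) (by simp) with heq | hrel
      · have h' := congrArg Prod.fst heq
        simp at h'
        omega
      · simpa using hrel
    rw [ha]
    simp [le_antisymm hle hge]


theorem maxLoopA_eq : ∀ (l : List (Int × Int)) (values posns : List Int),
    values.length < 3 →
    maxLoopA l values posns =
      (values ++ ((dedupF values l).take (3 - values.length)).map (fun p => p.1),
       posns ++ ((dedupF values l).take (3 - values.length)).map (fun p => p.2)) := by
  intro l
  induction l with
  | nil => intro values posns h; simp [maxLoopA, dedupF]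
  | cons q rest ih =>
    intro values posns h
    obtain ⟨x, i⟩ := q
    simp only [maxLoopA, dedupF]
    by_cases hx : x ∈ values
    · rw [if_pos hx, if_pos hx]
      exact ih values posns h
    · rw [if_neg hx, if_neg hx]
      by_cases h3 : (values ++ [x]).length = 3
      · rw [if_pos h3]
        have hv : values.length = 2 := by simp at h3; omega
        simp [hv]
      · rw [if_neg h3]
        have hlen : (values ++ [x]).length < 3 := by
          simp at h3 ⊢; omega
        rw [ih _ _ hlen]
        have hstep : 3 - values.length = (3 - (values.length + 1)) + 1 := by omega
        rw [hstep, List.take_succ_cons]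
        simp [List.append_assoc]


-- ===== VERDICT (by name: the statement is the Claim_ definition above) =====
theorem max_first_three_spec : Claim_equal_max_first_three := by
  intro lst _
  simp only [Spec_max_first_three, max_first_three, max_first_three_alt]
  set S := PySem.List.sorted2 ((PySem.List.enumerate lst).map (fun p => (p.2, p.1)))
      (fun t : Int × Int => t.1) (fun t : Int × Int => t.2) true with hS
  set d := (PySem.List.enumerate lst).foldl (fun d p => d.insert p.2 p.1)
      (PySem.Dict.empty : PySem.Dict Int Int) with hd
  have hpwS := sorted2_rev_pairwise ((PySem.List.enumerate lst).map (fun p => (p.2, p.1)))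
  rw [← hS] at hpwS
  have hLlex := List.Pairwise.sublist (dedupF_sublist S []) hpwS
  have hLne : (dedupF [] S).Pairwise (fun a b : Int × Int => a.1 ≠ b.1) :=
    List.pairwise_map.mp (dedupF_fst_nodup S [])
  have hpairL : (dedupF [] S).Pairwise (fun a b : Int × Int => b.1 < a.1) := by
    refine (hLlex.and hLne).imp ?_
    rintro a b ⟨h1 | ⟨he, -⟩, h2⟩
    · exact h1
    · exact absurd he.symm h2
  have hLnd : (dedupF [] S).Nodup :=
    hpairL.imp (fun h heq => absurd (heq ▸ h) (lt_irrefl _))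
  have hknd : d.keys.Nodup := by
    rw [hd]
    exact PySem.Dict.nodup_keys_foldl_insert_key _ (fun q : Int × Int => q.2)
      (fun _ q => q.1) _ (by simp [PySem.Dict.keys_empty])
  have hind : d.items.Nodup := by
    simp only [PySem.Dict.keys] at hknd
    exact hknd.of_map
  have hperm : (dedupF [] S).Perm d.items :=
    (List.perm_ext_iff_of_nodup hLnd hind).mpr (fun q => by
      rw [hS, hd]
      exact (mem_L_iff lst q).trans (mem_items_iff lst q).symm)
  have hsorted : PySem.List.sorted d.items (fun t : Int × Int => t.1) true = dedupF [] S :=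
    PySem.List.sorted_rev_eq_of_perm_of_pairwise_gt _ _ _ hperm hpairL
  rw [hsorted, PySem.List.slice_to _ (show (0:Int) ≤ 3 by norm_num),
    maxLoopA_eq _ [] [] (by simp)]
  simp
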